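-- pv_equiv track=rewrite | github.com/hiller-lab/kaur-jakob-2021 | analysis.py | convert_seq
-- ===== SOURCE A (Python) =====
-- def convert_seq(seq):
--     rules = {"A": "H",
--              "C": "H",
--              "D": "C",
--              "E": "C",
--              "F": "AH",
--              "G": "N",
--              "H": "C",
--              "I": "H",
--              "K": "C",
--              "L": "H",
--              "M": "H",
--              "N": "P",
--              "P": "H",
--              "Q": "P",
--              "R": "C",
--              "S": "P",
--              "T": "P",
--              "V": "H",
--              "W": "AH",
--              "Y": "AP"}
--
--     converted_bsignals = []
--
--     def cnvrt(seq, lst=converted_bsignals, pos=0, rul=rules, conv=""):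
--         if len(conv) == len(seq):
--             lst.append(conv)
--         else:
--             aatype = rul[seq[pos]]
--             for c in aatype:
--                 cnvrt(seq, lst, pos+1, rul, conv+c) # recursive
--
--     cnvrt(seq, converted_bsignals)
--
--     return converted_bsignals
-- ===== SOURCE B (Python) =====
-- def convert_seq(seq):
--     rules = {"A": "H",
--              "C": "H",
--              "D": "C",
--              "E": "C",
--              "F": "AH",
--              "G": "N",
--              "H": "C",
--              "I": "H",
--              "K": "C",
--              "L": "H",
--              "M": "H",
--              "N": "P",
--              "P": "H",
--              "Q": "P",
--              "R": "C",
--              "S": "P",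
--              "T": "P",
--              "V": "H",
--              "W": "AH",
--              "Y": "AP"}
--     prefixes = [""]
--     for ch in seq:
--         options = rules[ch]
--         prefixes = [p + c for p in prefixes for c in options]
--     return prefixes
-- ===== Notes on version B (the rewrite author's own statement) =====
-- stated objective: simpler
-- what changed: Replaced A's recursive backtracking helper (which threads a shared accumulator list, a position and a partial string through recursive calls) by an iterative left-to-right breadth-first expansion: keep the list of all prefixes built so far and extend each by every option of the next residue in a single loop.
import Mathlib
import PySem

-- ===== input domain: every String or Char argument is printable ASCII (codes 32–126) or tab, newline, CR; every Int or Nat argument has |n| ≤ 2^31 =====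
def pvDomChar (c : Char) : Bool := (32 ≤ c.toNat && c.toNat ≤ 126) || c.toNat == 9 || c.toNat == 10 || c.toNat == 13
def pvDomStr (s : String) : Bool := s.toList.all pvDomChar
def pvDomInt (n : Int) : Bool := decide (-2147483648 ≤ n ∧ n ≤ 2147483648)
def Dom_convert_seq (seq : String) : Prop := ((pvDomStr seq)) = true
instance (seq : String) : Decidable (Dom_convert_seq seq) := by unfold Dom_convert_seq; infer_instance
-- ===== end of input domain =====

-- B replaces A's recursive backtracking helper by an iterative left-to-right
-- prefix expansion loop (objective: simpler; same cost).

-- ===== PORT A =====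
-- A's rules dict as a function; none = key absent (Python: KeyError)
def pvRules (c : Char) : Option (List Char) :=
  match c with
  | 'A' => some ['H'] | 'C' => some ['H'] | 'D' => some ['C'] | 'E' => some ['C']
  | 'F' => some ['A','H'] | 'G' => some ['N'] | 'H' => some ['C'] | 'I' => some ['H']
  | 'K' => some ['C'] | 'L' => some ['H'] | 'M' => some ['H'] | 'N' => some ['P']
  | 'P' => some ['H'] | 'Q' => some ['P'] | 'R' => some ['C'] | 'S' => some ['P']
  | 'T' => some ['P'] | 'V' => some ['H'] | 'W' => some ['A','H'] | 'Y' => some ['A','P']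
  | _ => none

-- A's inner cnvrt: lst is threaded through the recursive calls (Python appends to a
-- shared list); strings are carried as code-point lists (PySem.Chars convention).
def pvCnvrt (seqL : List Char) (lst : List String) (pos : Nat) (conv : List Char) :
    List String :=
  if conv.length = seqL.length then lst ++ [String.ofList conv]
  else
    match h : PySem.List.pyGet? seqL (pos : Int) with  -- h: used by decreasing_by
    | none => lst        -- Python raises IndexError here; unreachable from the top-level call
    | some ch =>
      match pvRules ch with
      | none => lst      -- Python raises KeyError; excluded by Pre_convert_seq
      | some aatype =>
        aatype.foldl (fun l c => pvCnvrt seqL l (pos + 1) (conv ++ [c])) lst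
termination_by seqL.length - pos
decreasing_by
  simp only [PySem.List.pyGet?_natCast] at h
  obtain ⟨hlt, -⟩ := List.getElem?_eq_some_iff.mp h
  omega

def convert_seq (seq : String) : List String := pvCnvrt seq.toList [] 0 []

-- ===== PORT B =====
-- B's rules dict, kept as a dict (association list with first-match lookup)
def pvTable : PySem.Dict Char String :=
  PySem.Dict.ofList
    [('A', "H"), ('C', "H"), ('D', "C"), ('E', "C"), ('F', "AH"), ('G', "N"),
     ('H', "C"), ('I', "H"), ('K', "C"), ('L', "H"), ('M', "H"), ('N', "P"),
     ('P', "H"), ('Q', "P"), ('R', "C"), ('S', "P"), ('T', "P"), ('V', "H"),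
     ('W', "AH"), ('Y', "AP")]

-- the loop: prefixes starts as [""]; each residue extends every prefix by each option.
-- On a missing key Python raises KeyError (excluded by Pre_convert_seq); the port
-- takes no options there.
def convert_seq_alt (seq : String) : List String :=
  (seq.toList.foldl
    (fun prefixes ch =>
      prefixes.flatMap (fun p =>
        ((pvTable.get? ch).getD "").toList.map (fun c => p ++ [c])))
    ([[]] : List (List Char))).map String.ofList

-- ===== PRECONDITION & SPEC =====
-- Pre_ excludes sequences containing a residue outside the 20 rule keys: there both
-- A and B raise KeyError (no value is returned).
def pvKeyChars : List Char := ['A','C','D','E','F','G','H','I','K','L','M','N','P','Q','R','S','T','V','W','Y']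
def Pre_convert_seq (seq : String) : Prop :=
  (seq.toList.all (fun c => pvKeyChars.contains c)) = true
instance (seq : String) : Decidable (Pre_convert_seq seq) := by
  unfold Pre_convert_seq; infer_instance

def pvWitness_convert_seq : String := "WFY"

def Spec_convert_seq (seq : String) (out : List String) : Prop := out = convert_seq_alt seq
instance (seq : String) (out : List String) : Decidable (Spec_convert_seq seq out) := by
  unfold Spec_convert_seq; infer_instance

-- ===== CLAIM (what is proved, stated in full; the proofs are below) =====
def Claim_equal_convert_seq : Prop :=
  ∀ (seq : String), Dom_convert_seq seq → Pre_convert_seq seq →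
    Spec_convert_seq seq (convert_seq seq)

-- ===== LEMMAS AND PROOFS =====

-- proof-side spec: all conversions of a (suffix of the) sequence
def pvSuffixes : List Char → List (List Char)
  | [] => [[]]
  | c :: cs => ((pvRules c).getD []).flatMap (fun ch => (pvSuffixes cs).map (ch :: ·))

lemma pvRules_isSome_of_key (c : Char) (h : c ∈ pvKeyChars) :
    (pvRules c).isSome := by
  simp only [pvKeyChars] at h
  fin_cases h <;> decide

-- the two dicts agree on the key set
lemma pvTable_eq_rules (c : Char) (h : c ∈ pvKeyChars) :
    ((pvTable.get? c).getD "").toList = (pvRules c).getD [] := by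
  simp only [pvKeyChars] at h
  fin_cases h <;> decide

-- A-side: the recursion from position pos with partial string conv appends, after lst,
-- conv prefixed to every conversion of the remaining residues
lemma pvCnvrt_eq_suffixes (seqL : List Char) :
    ∀ (rest : List Char) (pos : Nat) (conv : List Char) (lst : List String),
      seqL.drop pos = rest → conv.length = pos → pos ≤ seqL.length →
      (∀ c ∈ rest, c ∈ pvKeyChars) →
      pvCnvrt seqL lst pos conv
        = lst ++ (pvSuffixes rest).map (fun l => String.ofList (conv ++ l)) := by
  intro rest
  induction rest with
  | nil =>
    intro pos conv lst hdrop hcl hle _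
    have hpos : seqL.length ≤ pos := by
      by_contra hlt
      exact (by simp [List.drop_eq_nil_iff]; omega : seqL.drop pos ≠ []) hdrop
    have hlen : conv.length = seqL.length := by omega
    unfold pvCnvrt
    simp [hlen, pvSuffixes]
  | cons ch rest' ih =>
    intro pos conv lst hdrop hcl hle hkeys
    have hget : seqL[pos]? = some ch := by
      have : (seqL.drop pos)[0]? = some ch := by simp [hdrop]
      simpa using this
    have hposlt : pos < seqL.length := by
      obtain ⟨hlt, -⟩ := List.getElem?_eq_some_iff.mp hget; exact hlt
    obtain ⟨o, ho⟩ := Option.isSome_iff_exists.mp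
      (pvRules_isSome_of_key ch (hkeys ch (by simp)))
    unfold pvCnvrt
    have hne : ¬ conv.length = seqL.length := by omega
    simp only [hne, if_false]
    split
    case _ heq =>
      rw [PySem.List.pyGet?_natCast, hget] at heq; exact absurd heq (by simp)
    case _ ch' heq =>
      rw [PySem.List.pyGet?_natCast, hget] at heq
      obtain rfl : ch = ch' := by simpa using heq
      simp only [ho]
      have hdrop' : seqL.drop (pos + 1) = rest' := by
        rw [← List.drop_drop, hdrop]; rfl
      have hstep : ∀ (l : List String) (c : Char),
          pvCnvrt seqL l (pos + 1) (conv ++ [c])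
            = l ++ (pvSuffixes rest').map (fun l2 => String.ofList (conv ++ c :: l2)) := by
        intro l c
        rw [ih (pos + 1) (conv ++ [c]) l hdrop' (by simp [hcl]) (by omega)
              (fun x hx => hkeys x (by simp [hx]))]
        simp
      rw [PySem.List.foldl_congr_mem (l := o) (init := lst)
            (f := fun l c => pvCnvrt seqL l (pos + 1) (conv ++ [c]))
            (g := fun l c => l ++ (pvSuffixes rest').map (fun l2 => String.ofList (conv ++ c :: l2)))
            (fun l c _ => hstep l c),
          PySem.List.foldl_append_eq_flatMap]
      show _ = lst ++ (pvSuffixes (ch :: rest')).map _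
      simp only [pvSuffixes, ho, Option.getD_some, List.map_flatMap, List.map_map]
      rfl

-- B-side: the loop over cs turns each prefix into prefix ++ every conversion of cs
lemma pvFold_eq_suffixes :
    ∀ (cs : List Char) (prefixes : List (List Char)),
      (∀ c ∈ cs, c ∈ pvKeyChars) →
      cs.foldl
          (fun prefixes ch =>
            prefixes.flatMap (fun p =>
              ((pvTable.get? ch).getD "").toList.map (fun c => p ++ [c])))
          prefixes
        = prefixes.flatMap (fun p => (pvSuffixes cs).map (p ++ ·)) := by
  intro cs
  induction cs with
  | nil => intro prefixes _; simp [pvSuffixes]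
  | cons c cs ih =>
    intro prefixes hkeys
    rw [List.foldl_cons, ih _ (fun x hx => hkeys x (by simp [hx])),
        pvTable_eq_rules c (hkeys c (by simp))]
    simp only [pvSuffixes, List.flatMap_assoc, List.flatMap_map, List.map_flatMap,
      List.map_map, Function.comp_def, List.append_assoc, List.singleton_append]

-- ===== VERDICT (by name: the statement is the Claim_ definition above) =====
theorem convert_seq_spec : Claim_equal_convert_seq := by
  intro seq _ hpre
  unfold Spec_convert_seq convert_seq convert_seq_alt
  have hmem : ∀ c ∈ seq.toList, c ∈ pvKeyChars := by
    intro c hc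
    have := (List.all_eq_true.mp hpre) c hc
    simpa [List.contains_iff_mem] using this
  rw [pvCnvrt_eq_suffixes seq.toList seq.toList 0 [] [] (by simp) rfl (by simp) hmem,
      pvFold_eq_suffixes seq.toList [[]] hmem]
  simp
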